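-- pv_equiv track=rewrite | github.com/ChristopherClemm/SlidingTile | main.py | misplaced
-- ===== SOURCE A (Python) =====
-- def misplaced(initial, goal):
--     numMis = 0
--     size = len(goal)*len(goal)
--     for num in range(1, size):
--         for i in range(len(initial)):
--             for j in range(len(initial)):
--                 if initial[i][j] == num:
--                     if initial[i][j] != goal[i][j]:
--                         numMis +=1
--     return numMis
-- ===== SOURCE B (Python) =====
-- def misplaced(initial, goal):
--     size = len(goal) * len(goal)
--     n = len(initial)
--     return sum(1
--                for i, row in enumerate(initial)
--                for j, v in enumerate(row[:n])
--                if 1 <= v < size and v != goal[i][j])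
-- ===== Notes on version B (the rewrite author's own statement) =====
-- stated objective: faster
-- what changed: Replaces A's per-tile-number rescans of the whole grid (a full double loop for every num in 1..size-1) by a single pass over the cells that counts cells whose value lies in 1..size-1 and differs from the goal cell.
import Mathlib
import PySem

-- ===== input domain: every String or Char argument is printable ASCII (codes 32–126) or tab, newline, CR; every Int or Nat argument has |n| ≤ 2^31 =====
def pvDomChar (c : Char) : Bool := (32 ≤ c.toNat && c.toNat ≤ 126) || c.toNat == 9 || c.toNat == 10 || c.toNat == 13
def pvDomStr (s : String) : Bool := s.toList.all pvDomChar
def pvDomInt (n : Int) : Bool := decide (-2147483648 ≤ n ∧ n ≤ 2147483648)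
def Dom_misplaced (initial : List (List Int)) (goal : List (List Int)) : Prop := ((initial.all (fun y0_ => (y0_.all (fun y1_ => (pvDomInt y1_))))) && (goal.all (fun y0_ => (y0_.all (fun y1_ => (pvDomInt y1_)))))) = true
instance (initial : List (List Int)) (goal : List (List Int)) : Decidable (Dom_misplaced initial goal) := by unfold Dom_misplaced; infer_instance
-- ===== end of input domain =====

-- B replaces A's per-tile-number rescans of the grid by a single pass over the cells (asymptotically faster).

-- shared indexing helper: grid[i][j] with Python index semantics (default only reached outside Pre_)
def pvCell (g : List (List Int)) (i j : Int) : Int :=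
  PySem.List.pyGetD (PySem.List.pyGetD g i []) j 0

-- ===== PORT A =====
def misplaced (initial : List (List Int)) (goal : List (List Int)) : Int :=
  let size : Int := (goal.length : Int) * (goal.length : Int)
  (PySem.List.pyRange 1 size 1).foldl (fun numMis num =>
    (PySem.List.pyRange 0 (initial.length : Int) 1).foldl (fun numMis i =>
      (PySem.List.pyRange 0 (initial.length : Int) 1).foldl (fun numMis j =>
        if pvCell initial i j = num then
          if pvCell initial i j ≠ pvCell goal i j then numMis + 1 else numMis
        else numMis) numMis) numMis) 0

-- ===== PORT B =====
def misplaced_alt (initial : List (List Int)) (goal : List (List Int)) : Int :=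
  let size : Int := (goal.length : Int) * (goal.length : Int)
  let n : Nat := initial.length
  ((PySem.List.enumerate initial 0).flatMap (fun p =>
    (PySem.List.enumerate (PySem.List.slice p.2 none (some (n : Int))) 0).filterMap (fun q =>
      if 1 ≤ q.2 ∧ q.2 < size ∧ q.2 ≠ pvCell goal p.1 q.1 then some (1 : Int) else none))).sum

-- ===== PRECONDITION & SPEC =====
-- Pre_ is exactly the set of inputs on which the Python A returns (A raises IndexError outside it):
-- when goal has at least 2 rows A reads initial[i][j] for all i,j < len(initial), and goal[i][j]
-- whenever that cell's value lies in 1..size-1.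
def Pre_misplaced (initial : List (List Int)) (goal : List (List Int)) : Prop :=
  goal.length ≤ 1 ∨
  ((∀ row ∈ initial, initial.length ≤ row.length) ∧
   ∀ i < initial.length, ∀ j < initial.length,
     (1 ≤ (initial.getD i []).getD j 0 ∧
       (initial.getD i []).getD j 0 < (goal.length : Int) * (goal.length : Int)) →
     i < goal.length ∧ j < (goal.getD i []).length)
instance (initial : List (List Int)) (goal : List (List Int)) : Decidable (Pre_misplaced initial goal) := by
  unfold Pre_misplaced; infer_instance

def pvWitness_misplaced : List (List Int) × List (List Int) := ([[1, 2], [3, 0]], [[0, 1], [2, 3]])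

def Spec_misplaced (initial : List (List Int)) (goal : List (List Int)) (out : Int) : Prop := out = misplaced_alt initial goal
instance (initial : List (List Int)) (goal : List (List Int)) (out : Int) : Decidable (Spec_misplaced initial goal out) := by unfold Spec_misplaced; infer_instance

-- ===== CLAIM (what is proved, stated in full; the proofs are below) =====
def Claim_equal_misplaced : Prop := ∀ (initial : List (List Int)) (goal : List (List Int)), Dom_misplaced initial goal → Pre_misplaced initial goal → Spec_misplaced initial goal (misplaced initial goal)

-- ===== LEMMAS AND PROOFS =====

-- a foldl that only adds is a sum
theorem pv_foldl_add {α : Type} (l : List α) (f : Int → α → Int) (g : α → Int)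
    (h : ∀ a x, f a x = a + g x) : ∀ acc : Int, l.foldl f acc = acc + (l.map g).sum := by
  induction l with
  | nil => intro acc; simp
  | cons x xs ih =>
      intro acc
      rw [List.foldl_cons, h, ih, List.map_cons, List.sum_cons]
      ring

theorem pv_sum_filterMap {α : Type} (l : List α) (p : α → Prop) [DecidablePred p] :
    (l.filterMap (fun x => if p x then some (1 : Int) else none)).sum
      = (l.map (fun x => if p x then (1 : Int) else 0)).sum := by
  induction l with
  | nil => rfl
  | cons x xs ih => by_cases hx : p x <;> simp [hx, ih]

theorem pv_sum_map_add {α : Type} (l : List α) (f g : α → Int) :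
    (l.map (fun x => f x + g x)).sum = (l.map f).sum + (l.map g).sum := by
  induction l with
  | nil => simp
  | cons x xs ih => simp [ih]; ring

theorem pv_sum_comm {α β : Type} (l1 : List α) (l2 : List β) (f : α → β → Int) :
    (l1.map (fun a => (l2.map (f a)).sum)).sum
      = (l2.map (fun b => (l1.map (fun a => f a b)).sum)).sum := by
  induction l1 with
  | nil => simp
  | cons a l1 ih =>
      rw [List.map_cons, List.sum_cons, ih, ← pv_sum_map_add]
      congr 1

-- summing the tile-number indicator over num = 1..m gives the range test
theorem pv_num_sum (m : Nat) (v w : Int) :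
    ((List.range m).map (fun (k : Nat) => if v = 1 + (k : Int) ∧ v ≠ w then (1 : Int) else 0)).sum
      = if 1 ≤ v ∧ v < 1 + (m : Int) ∧ v ≠ w then 1 else 0 := by
  induction m with
  | zero =>
      simp only [List.range_zero, List.map_nil, List.sum_nil]
      split_ifs with h
      · exfalso; omega
      · rfl
  | succ m ih =>
      rw [List.range_succ, List.map_append, List.sum_append, ih]
      simp only [List.map_cons, List.map_nil, List.sum_cons, List.sum_nil]
      push_cast
      split_ifs <;> omega

-- a sum over range n where terms vanish from m on equals the sum over range m
theorem pv_sum_range_tail (m n : Nat) (hmn : m ≤ n) (f : Nat → Int)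
    (h : ∀ j, m ≤ j → j < n → f j = 0) :
    ((List.range n).map f).sum = ((List.range m).map f).sum := by
  obtain ⟨k, rfl⟩ : ∃ k, n = m + k := ⟨n - m, by omega⟩
  rw [List.range_add, List.map_append, List.sum_append, List.map_map]
  have hz : ((List.range k).map (f ∘ (m + ·))).sum = 0 := by
    apply List.sum_eq_zero
    intro x hx
    simp only [List.mem_map, List.mem_range] at hx
    obtain ⟨j, hj, rfl⟩ := hx
    simpa using h (m + j) (by omega) (by omega)
  rw [hz, add_zero]

theorem pv_sum_flatMap {α β : Type} (l : List α) (f : α → List β) [AddCommMonoid β] :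
    ((l.flatMap f).sum : β) = (l.map (fun a => (f a).sum)).sum := by
  induction l with
  | nil => rfl
  | cons x xs ih => simp [List.flatMap_cons, ih]

-- cell value as seen through Nat indices
def pvV (g : List (List Int)) (i j : Nat) : Int := (g.getD i []).getD j 0

-- A as a triple sum over Nat ranges
theorem pv_A_eq (initial goal : List (List Int)) :
    misplaced initial goal =
      ((List.range (((goal.length : Int) * (goal.length : Int) - 1).toNat)).map (fun (k : Nat) =>
        ((List.range initial.length).map (fun (i : Nat) =>
          ((List.range initial.length).map (fun (j : Nat) =>
            if pvV initial i j = 1 + (k : Int) ∧ pvV initial i j ≠ pvV goal i j then (1 : Int) else 0)).sum)).sum)).sum := by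
  unfold misplaced
  have hin : ∀ (num acc : Int),
      (PySem.List.pyRange 0 (initial.length : Int) 1).foldl (fun numMis i =>
        (PySem.List.pyRange 0 (initial.length : Int) 1).foldl (fun numMis j =>
          if pvCell initial i j = num then
            if pvCell initial i j ≠ pvCell goal i j then numMis + 1 else numMis
          else numMis) numMis) acc
      = acc + ((PySem.List.pyRange 0 (initial.length : Int) 1).map (fun i =>
          ((PySem.List.pyRange 0 (initial.length : Int) 1).map (fun j =>
            if pvCell initial i j = num ∧ pvCell initial i j ≠ pvCell goal i j then (1 : Int) else 0)).sum)).sum := by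
    intro num acc
    apply pv_foldl_add
    intro a i
    apply pv_foldl_add
    intro a j
    split_ifs <;> omega
  rw [pv_foldl_add _ _ _ (fun a num => hin num a) 0, zero_add]
  rw [PySem.List.pyRange_one 1, PySem.List.pyRange_zero_natCast]
  simp only [List.map_map, Function.comp_def, pvCell, pvV, PySem.List.pyGetD_natCast]
  rfl

-- B as a double sum over Nat ranges (columns limited to the actual row, truncated at n)
theorem pv_B_eq (initial goal : List (List Int)) :
    misplaced_alt initial goal =
      ((List.range initial.length).map (fun (i : Nat) =>
        ((List.range ((initial.getD i []).take initial.length).length).map (fun (j : Nat) =>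
          if 1 ≤ ((initial.getD i []).take initial.length).getD j 0 ∧
             ((initial.getD i []).take initial.length).getD j 0 < (goal.length : Int) * (goal.length : Int) ∧
             ((initial.getD i []).take initial.length).getD j 0 ≠ pvV goal i j
          then (1 : Int) else 0)).sum)).sum := by
  unfold misplaced_alt
  rw [pv_sum_flatMap, PySem.List.enumerate_eq_map_pyRange _ ([] : List Int)]
  simp only [List.map_map, Function.comp_def, PySem.List.len_eq, PySem.List.pyRange_zero_natCast]
  simp only [PySem.List.pyGetD_natCast, PySem.List.slice_to_natCast]
  apply congrArg
  apply List.map_congr_left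
  intro i _
  rw [PySem.List.enumerate_eq_map_pyRange _ (0 : Int), List.filterMap_map]
  simp only [Function.comp_def]
  rw [pv_sum_filterMap]
  simp only [List.map_map, Function.comp_def, PySem.List.len_eq, PySem.List.pyRange_zero_natCast,
    PySem.List.pyGetD_natCast, pvCell, pvV]
  rfl

-- per-row: the range-n sum of A's shape equals B's truncated-row sum
theorem pv_row_eq (n : Nat) (row : List Int) (size : Int) (w : Nat → Int) :
    ((List.range n).map (fun j =>
        if 1 ≤ row.getD j 0 ∧ row.getD j 0 < size ∧ row.getD j 0 ≠ w j then (1 : Int) else 0)).sum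
      = ((List.range (row.take n).length).map (fun j =>
        if 1 ≤ (row.take n).getD j 0 ∧ (row.take n).getD j 0 < size ∧ (row.take n).getD j 0 ≠ w j
        then (1 : Int) else 0)).sum := by
  have hlen : (row.take n).length = min n row.length := List.length_take
  rw [pv_sum_range_tail (min n row.length) n (by omega) _ (by
    intro j hj hjn
    have hz : row.getD j 0 = 0 := by
      have : row.length ≤ j := by omega
      simp [List.getD_eq_getElem?_getD, List.getElem?_eq_none this]
    rw [hz, if_neg]
    rintro ⟨h1, -, -⟩
    exact absurd h1 (by norm_num))]
  rw [hlen]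
  apply congrArg
  apply List.map_congr_left
  intro j hj
  simp only [List.mem_range] at hj
  have : (row.take n).getD j 0 = row.getD j 0 := by
    simp [List.getD_eq_getElem?_getD, Nat.lt_of_lt_of_le hj (by omega : min n row.length ≤ n)]
  rw [this]

-- the two ports agree on every input
theorem pv_main (initial goal : List (List Int)) :
    misplaced initial goal = misplaced_alt initial goal := by
  rw [pv_A_eq, pv_B_eq, pv_sum_comm]
  apply congrArg
  apply List.map_congr_left
  intro i _
  rw [pv_sum_comm]
  have hsize : (0 : Int) ≤ (goal.length : Int) * (goal.length : Int) := mul_self_nonneg _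
  have hstep : ∀ j ∈ List.range initial.length,
      ((List.range (((goal.length : Int) * (goal.length : Int) - 1).toNat)).map (fun (k : Nat) =>
        if pvV initial i j = 1 + (k : Int) ∧ pvV initial i j ≠ pvV goal i j then (1 : Int) else 0)).sum
      = if 1 ≤ pvV initial i j ∧ pvV initial i j < (goal.length : Int) * (goal.length : Int) ∧
           pvV initial i j ≠ pvV goal i j then (1 : Int) else 0 := by
    intro j _
    rw [pv_num_sum]
    apply if_congr _ rfl rfl
    constructor
    · rintro ⟨h1, h2, h3⟩; exact ⟨h1, by omega, h3⟩
    · rintro ⟨h1, h2, h3⟩; exact ⟨h1, by omega, h3⟩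
  rw [List.map_congr_left hstep]
  exact pv_row_eq initial.length (initial.getD i []) _ (fun j => pvV goal i j)

-- ===== VERDICT (by name: the statement is the Claim_ definition above) =====
theorem misplaced_spec : Claim_equal_misplaced := by
  intro initial goal _ _
  unfold Spec_misplaced
  exact pv_main initial goal
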